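-- pv_equiv track=rewrite | github.com/JumpingCodes/AdventofCode | 2024/02/main.py | check
-- ===== SOURCE A (Python) =====
-- def check(report):
--     report_sorted = sorted(report)
--     report_reversed_sorted = sorted(report, reverse=True)
--     if report not in (report_sorted, report_reversed_sorted):
--         return False
--
--     for i in range(1, len(report)):
--         diff = abs(report[i-1] - report[i])
--         if diff == 0 or diff > 3:
--             return False
--     return True
-- ===== SOURCE B (Python) =====
-- def check(report):
--     diffs = [b - a for a, b in zip(report, report[1:])]
--     return all(1 <= d <= 3 for d in diffs) or all(-3 <= d <= -1 for d in diffs)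
-- ===== Notes on version B (the rewrite author's own statement) =====
-- stated objective: faster
-- what changed: B replaces the two sorts and list comparisons plus an index loop by a single pass over adjacent differences, checking they are all between 1 and 3 or all between -3 and -1 (which already implies monotonicity).
import Mathlib
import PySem

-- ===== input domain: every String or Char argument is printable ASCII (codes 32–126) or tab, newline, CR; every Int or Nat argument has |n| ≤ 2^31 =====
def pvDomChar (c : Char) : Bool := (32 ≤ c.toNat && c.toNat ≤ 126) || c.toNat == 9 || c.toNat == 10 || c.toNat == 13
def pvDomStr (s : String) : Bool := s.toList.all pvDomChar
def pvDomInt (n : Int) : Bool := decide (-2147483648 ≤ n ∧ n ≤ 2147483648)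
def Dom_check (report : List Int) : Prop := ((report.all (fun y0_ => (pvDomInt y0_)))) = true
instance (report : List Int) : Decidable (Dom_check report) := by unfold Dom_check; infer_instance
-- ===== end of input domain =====

-- B replaces the two sorts + index loop of A by one linear pass over adjacent differences.

-- ===== PORT A =====
-- the for-loop over range(1, len(report)); indices drawn from the range are always in bounds,
-- so pyGetD with default 0 is exact here
def checkLoopA (report : List Int) : List Int → Bool
  | [] => true
  | i :: rest =>
    let diff : Int := |PySem.List.pyGetD report (i - 1) 0 - PySem.List.pyGetD report i 0|
    if diff = 0 ∨ diff > 3 then false else checkLoopA report rest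

def check (report : List Int) : Bool :=
  let report_sorted := PySem.List.sorted report (fun x => x) false
  let report_reversed_sorted := PySem.List.sorted report (fun x => x) true
  if ¬ (report = report_sorted ∨ report = report_reversed_sorted) then false
  else checkLoopA report (PySem.List.pyRange 1 report.length 1)

-- ===== PORT B =====
def check_alt (report : List Int) : Bool :=
  let diffs := (report.zip report.tail).map (fun p => p.2 - p.1)
  diffs.all (fun d => decide (1 ≤ d) && decide (d ≤ 3)) ||
    diffs.all (fun d => decide (-3 ≤ d) && decide (d ≤ -1))

-- ===== PRECONDITION & SPEC =====
def Spec_check (report : List Int) (out : Bool) : Prop := out = check_alt report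
instance (report : List Int) (out : Bool) : Decidable (Spec_check report out) := by unfold Spec_check; infer_instance

-- ===== CLAIM (what is proved, stated in full; the proofs are below) =====
def Claim_equal_check : Prop := ∀ (report : List Int), Dom_check report → Spec_check report (check report)

-- ===== LEMMAS AND PROOFS =====

-- the per-pair test of A's loop
def okAbs (a b : Int) : Bool := if |a - b| = 0 ∨ |a - b| > 3 then false else true

theorem okAbs_iff (a b : Int) : okAbs a b = true ↔ (a - b ≠ 0 ∧ -3 ≤ a - b ∧ a - b ≤ 3) := by
  rcases abs_cases (a - b) with ⟨he, h0⟩ | ⟨he, h0⟩ <;>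
    simp only [okAbs, he] <;> split_ifs with h <;> simp <;> omega

theorem getD_append_length (pre : List Int) (x : Int) (l : List Int) (d : Int) :
    (pre ++ x :: l).getD pre.length d = x := by
  induction pre with
  | nil => rfl
  | cons h t ih => simp

theorem getD_append_length_succ (pre : List Int) (x y : Int) (l : List Int) (d : Int) :
    (pre ++ x :: y :: l).getD (pre.length + 1) d = y := by
  induction pre with
  | nil => rfl
  | cons h t ih => simp

theorem checkLoopA_eq_pairs (rest : List Int) : ∀ (pre : List Int) (x : Int),
    checkLoopA (pre ++ x :: rest) (PySem.List.pyRange ((pre.length : Int) + 1) ((pre ++ x :: rest).length : Int) 1)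
      = ((x :: rest).zip rest).all (fun p => okAbs p.1 p.2) := by
  induction rest with
  | nil =>
    intro pre x
    rw [PySem.List.pyRange_one_eq_nil (by simp)]
    rfl
  | cons y t ih =>
    intro pre x
    have hlen : ((pre.length : Int) + 1) < ((pre ++ x :: y :: t).length : Int) := by
      simp
    rw [PySem.List.pyRange_one_cons hlen]
    show checkLoopA _ _ = _
    rw [checkLoopA]
    have h1 : PySem.List.pyGetD (pre ++ x :: y :: t) ((pre.length : Int) + 1 - 1) 0 = x := by
      have hcast : ((pre.length : Int) + 1 - 1) = ((pre.length : Nat) : Int) := by omega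
      rw [hcast, PySem.List.pyGetD_natCast, getD_append_length]
    have h2 : PySem.List.pyGetD (pre ++ x :: y :: t) ((pre.length : Int) + 1) 0 = y := by
      have hcast : ((pre.length : Int) + 1) = (((pre.length + 1 : Nat)) : Int) := by omega
      rw [hcast, PySem.List.pyGetD_natCast, getD_append_length_succ]
    rw [h1, h2]
    by_cases hbad : |x - y| = 0 ∨ |x - y| > 3
    · rw [if_pos hbad]
      have hfalse : okAbs x y = false := by rw [okAbs, if_pos hbad]
      rw [List.zip_cons_cons, List.all_cons, hfalse, Bool.false_and]
    · rw [if_neg hbad]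
      have htrue : okAbs x y = true := by rw [okAbs, if_neg hbad]
      have hx : (pre ++ [x]) ++ y :: t = pre ++ x :: y :: t := by simp
      have hih := ih (pre ++ [x]) y
      rw [hx] at hih
      have hc : (((pre ++ [x]).length : Nat) : Int) + 1 = (pre.length : Int) + 1 + 1 := by
        simp
      rw [hc] at hih
      rw [hih, List.zip_cons_cons, List.all_cons, htrue, Bool.true_and]

-- zip-all over adjacent pairs is IsChain
theorem adjAll_iff (p : Int × Int → Bool) : ∀ l : List Int,
    ((l.zip l.tail).all p = true ↔ List.IsChain (fun a b => p (a, b) = true) l)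
  | [] => by simp
  | [a] => by simp
  | a :: b :: t => by
    rw [List.tail_cons, List.zip_cons_cons, List.all_cons, List.isChain_cons_cons,
      Bool.and_eq_true]
    exact and_congr_right fun _ => adjAll_iff p (b :: t)

theorem isChain_and {R S : Int → Int → Prop} : ∀ {l : List Int},
    List.IsChain R l → List.IsChain S l → List.IsChain (fun a b => R a b ∧ S a b) l
  | [], _, _ => List.IsChain.nil
  | [_], _, _ => by simp
  | _ :: _ :: _, hr, hs => by
    rw [List.isChain_cons_cons] at hr hs ⊢
    exact ⟨⟨hr.1, hs.1⟩, isChain_and hr.2 hs.2⟩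

-- A's outer condition: list equals its sort iff it is pairwise-nondecreasing (resp. -nonincreasing)
theorem eq_sorted_iff (l : List Int) :
    l = PySem.List.sorted l (fun x => x) false ↔ l.Pairwise (· ≤ ·) := by
  constructor
  · intro h
    have hp := PySem.List.sorted_pairwise (xs := l) (key := fun x => x)
    rw [← h] at hp
    exact hp
  · intro h
    exact (PySem.List.sorted_eq_self_of_pairwise l (fun x => x) h).symm

theorem eq_sorted_rev_iff (l : List Int) :
    l = PySem.List.sorted l (fun x => x) true ↔ l.Pairwise (fun a b => b ≤ a) := by
  constructor
  · intro h
    have hp := PySem.List.sorted_pairwise_rev (xs := l) (key := fun x => x)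
    rw [← h] at hp
    exact hp
  · intro h
    exact (PySem.List.sorted_rev_eq_self_of_pairwise l (fun x => x) h).symm

theorem main_iff (l : List Int) :
    ((l.Pairwise (· ≤ ·) ∨ l.Pairwise (fun a b => b ≤ a)) ∧
        List.IsChain (fun a b => okAbs a b = true) l)
      ↔ (List.IsChain (fun a b => 1 ≤ b - a ∧ b - a ≤ 3) l ∨
          List.IsChain (fun a b => 1 ≤ a - b ∧ a - b ≤ 3) l) := by
  constructor
  · rintro ⟨hmono | hmono, habs⟩
    · left
      refine (isChain_and hmono.isChain habs).imp ?_
      rintro a b ⟨hle, hab⟩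
      rw [okAbs_iff] at hab
      omega
    · right
      refine (isChain_and hmono.isChain habs).imp ?_
      rintro a b ⟨hle, hab⟩
      rw [okAbs_iff] at hab
      omega
  · rintro (h | h)
    · refine ⟨Or.inl ?_, h.imp ?_⟩
      · have hlt : List.IsChain (fun a b : Int => a < b) l := h.imp (by intro a b hab; omega)
        exact (List.isChain_iff_pairwise.mp hlt).imp le_of_lt
      · intro a b hab
        rw [okAbs_iff]
        omega
    · refine ⟨Or.inr ?_, h.imp ?_⟩
      · have hlt : List.IsChain (fun a b : Int => b < a) l := h.imp (by intro a b hab; omega)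
        exact (List.isChain_iff_pairwise.mp hlt).imp (fun h => le_of_lt h)
      · intro a b hab
        rw [okAbs_iff]
        omega

theorem check_eq_true_iff (l : List Int) :
    check l = true ↔
      (((l = PySem.List.sorted l (fun x => x) false) ∨ l = PySem.List.sorted l (fun x => x) true) ∧
        List.IsChain (fun a b => okAbs a b = true) l) := by
  rw [check]
  by_cases hs : (l = PySem.List.sorted l (fun x => x) false) ∨ l = PySem.List.sorted l (fun x => x) true
  · rw [if_neg (not_not_intro hs)]
    cases l with
    | nil => exact ⟨fun _ => ⟨hs, List.IsChain.nil⟩, fun _ => rfl⟩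
    | cons x t =>
      have hpairs := checkLoopA_eq_pairs t [] x
      simp only [List.nil_append, List.length_nil, Nat.cast_zero, zero_add] at hpairs
      rw [hpairs]
      rw [show ((x :: t).zip t) = ((x :: t).zip (x :: t).tail) from rfl]
      rw [adjAll_iff (fun p => okAbs p.1 p.2) (x :: t)]
      exact ⟨fun h => ⟨hs, h⟩, fun h => h.2⟩
  · rw [if_pos hs]
    simp [hs]

theorem check_alt_eq_true_iff (l : List Int) :
    check_alt l = true ↔
      (List.IsChain (fun a b => 1 ≤ b - a ∧ b - a ≤ 3) l ∨
        List.IsChain (fun a b => 1 ≤ a - b ∧ a - b ≤ 3) l) := by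
  rw [check_alt]
  simp only [Bool.or_eq_true, List.all_map]
  rw [show ((fun d => decide (1 ≤ d) && decide (d ≤ 3)) ∘ fun p : Int × Int => p.2 - p.1)
      = (fun p : Int × Int => decide (1 ≤ p.2 - p.1) && decide (p.2 - p.1 ≤ 3)) from rfl]
  rw [show ((fun d => decide (-3 ≤ d) && decide (d ≤ -1)) ∘ fun p : Int × Int => p.2 - p.1)
      = (fun p : Int × Int => decide (-3 ≤ p.2 - p.1) && decide (p.2 - p.1 ≤ -1)) from rfl]
  rw [adjAll_iff _ l, adjAll_iff _ l]
  constructor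
  · rintro (h | h)
    · exact Or.inl (h.imp (by intro a b hab; simp at hab; omega))
    · exact Or.inr (h.imp (by intro a b hab; simp at hab; omega))
  · rintro (h | h)
    · exact Or.inl (h.imp (by intro a b hab; simp; omega))
    · exact Or.inr (h.imp (by intro a b hab; simp; omega))

-- ===== VERDICT (by name: the statement is the Claim_ definition above) =====
theorem check_spec : Claim_equal_check := by
  intro report _
  unfold Spec_check
  have h1 := check_eq_true_iff report
  have h2 := check_alt_eq_true_iff report
  have h3 := main_iff report
  rw [eq_sorted_iff, eq_sorted_rev_iff] at h1
  cases hc : check report <;> cases hca : check_alt report <;> simp_all
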